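-- pv_equiv track=rewrite | github.com/raeyoungii/baekjoon | 프로그래머스/월간 코드 챌린지 시즌1/두 번째 대회/프로그래밍3.py | solution
-- ===== SOURCE A (Python) =====
-- def reset_arr(n):
--     vst = [False] * (n + 1)
--     d = [0] * (n + 1)
--     return vst, d
--
-- def dfs(v, vst, d, adj_lst):
--     vst[v] = True
--     for nxt in adj_lst[v]:
--         if not vst[nxt]:
--             d[nxt] = d[v] + 1
--             dfs(nxt, vst, d, adj_lst)
--
-- def solution(n, edges):
--     adj_lst = [[] for _ in range(n + 1)]
--     for i, j in edges:
--         adj_lst[i].append(j)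
--         adj_lst[j].append(i)
--
--     vst, d = reset_arr(n)
--     dfs(1, vst, d, adj_lst)  # v1 = 1
--     v2 = d.index(max(d))
--
--     vst, d = reset_arr(n)
--     dfs(v2, vst, d, adj_lst)
--     if d.count(max(d)) > 1:
--         return max(d)
--     v3 = d.index(max(d))
--
--     vst, d = reset_arr(n)
--     dfs(v3, vst, d, adj_lst)
--     # v4 = d.index(max(d))
--     if d.count(max(d)) > 1:
--         answer = max(d)
--     else:
--         answer = max(d) - 1
--
--     return answer
-- ===== SOURCE B (Python) =====
-- def solution(n, edges):
--     adj = [[] for _ in range(n + 1)]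
--     for i, j in edges:
--         adj[i].append(j)
--         adj[j].append(i)
--
--     def run(src):
--         vst = [False] * (n + 1)
--         d = [0] * (n + 1)
--         vst[src] = True
--         stack = [(src, adj[src])]
--         while stack:
--             v, ns = stack.pop()
--             if ns:
--                 nxt, rest = ns[0], ns[1:]
--                 stack.append((v, rest))
--                 if not vst[nxt]:
--                     vst[nxt] = True
--                     d[nxt] = d[v] + 1
--                     stack.append((nxt, adj[nxt]))
--         return d
--
--     d = run(1)
--     d = run(d.index(max(d)))
--     m = max(d)
--     if d.count(m) > 1:
--         return m
--     d = run(d.index(m))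
--     m = max(d)
--     return m if d.count(m) > 1 else m - 1
-- ===== Notes on version B (the rewrite author's own statement) =====
-- stated objective: alternative
-- what changed: The recursive dfs (three reset_arr+dfs passes) is replaced by a single iterative explicit-stack traversal helper run(src) that pops (node, remaining-neighbours) frames from a stack, marking and recording d[nxt]=d[v]+1 at first encounter; the post-pass max/index/count logic is unchanged.
import Mathlib
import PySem

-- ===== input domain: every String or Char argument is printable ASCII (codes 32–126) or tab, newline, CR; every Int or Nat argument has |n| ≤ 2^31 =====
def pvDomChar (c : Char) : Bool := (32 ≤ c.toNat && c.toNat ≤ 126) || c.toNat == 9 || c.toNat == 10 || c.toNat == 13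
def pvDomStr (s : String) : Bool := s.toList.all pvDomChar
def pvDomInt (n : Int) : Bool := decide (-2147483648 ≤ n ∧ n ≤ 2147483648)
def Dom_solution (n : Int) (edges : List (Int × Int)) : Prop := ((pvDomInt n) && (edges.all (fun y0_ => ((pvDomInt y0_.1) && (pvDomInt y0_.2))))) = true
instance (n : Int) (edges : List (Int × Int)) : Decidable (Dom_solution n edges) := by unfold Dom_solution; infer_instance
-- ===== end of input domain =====

-- B replaces A's recursive dfs by an explicit-stack iterative traversal (one shared `run`
-- helper instead of reset_arr + three recursive passes); same post-pass logic, same results.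

-- ===== PORT A =====

-- reset_arr(n)
def resetArr (n : Int) : List Bool × List Int :=
  (List.replicate (n + 1).toNat false, List.replicate (n + 1).toNat (0 : Int))

-- dfs(v, vst, d, adj_lst): the recursion is fueled only to make it total in Lean; the
-- callers pass fuel (n+1)+1, which exceeds the recursion depth (each level marks a node).
mutual
  def dfsA (fuel : Nat) (v : Int) (vst : List Bool) (d : List Int) (adj : List (List Int)) :
      List Bool × List Int :=
    match fuel with
    | 0 => (vst, d)
    | fuel + 1 =>
        dfsLoopA fuel v (PySem.List.pyGetD adj v []) (PySem.List.pySetD vst v true) d adj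
  termination_by (fuel, 0)
  -- the `for nxt in adj_lst[v]` loop of dfs
  def dfsLoopA (fuel : Nat) (v : Int) (ns : List Int) (vst : List Bool) (d : List Int)
      (adj : List (List Int)) : List Bool × List Int :=
    match ns with
    | [] => (vst, d)
    | nxt :: rest =>
        if PySem.List.pyGetD vst nxt true = false then
          let s := dfsA fuel nxt vst (PySem.List.pySetD d nxt (PySem.List.pyGetD d v 0 + 1)) adj
          dfsLoopA fuel v rest s.1 s.2 adj
        else dfsLoopA fuel v rest vst d adj
  termination_by (fuel, ns.length + 1)
end

-- the adjacency-list construction loop of A's solution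
def buildAdjA (n : Int) (edges : List (Int × Int)) : List (List Int) :=
  edges.foldl
    (fun adj p =>
      let a1 := PySem.List.pySetD adj p.1 (PySem.List.pyGetD adj p.1 [] ++ [p.2])
      PySem.List.pySetD a1 p.2 (PySem.List.pyGetD a1 p.2 [] ++ [p.1]))
    (List.replicate (n + 1).toNat ([] : List Int))

def solution (n : Int) (edges : List (Int × Int)) : Int :=
  let adj := buildAdjA n edges
  let r1 := resetArr n
  let s1 := dfsA (r1.1.length + 1) 1 r1.1 r1.2 adj
  let v2 : Int := ((PySem.List.index? s1.2 ((PySem.List.max? s1.2 (fun x => x)).getD 0)).getD 0 : Nat)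
  let r2 := resetArr n
  let s2 := dfsA (r2.1.length + 1) v2 r2.1 r2.2 adj
  if 1 < PySem.List.count s2.2 ((PySem.List.max? s2.2 (fun x => x)).getD 0) then
    (PySem.List.max? s2.2 (fun x => x)).getD 0
  else
    let v3 : Int := ((PySem.List.index? s2.2 ((PySem.List.max? s2.2 (fun x => x)).getD 0)).getD 0 : Nat)
    let r3 := resetArr n
    let s3 := dfsA (r3.1.length + 1) v3 r3.1 r3.2 adj
    if 1 < PySem.List.count s3.2 ((PySem.List.max? s3.2 (fun x => x)).getD 0) then
      (PySem.List.max? s3.2 (fun x => x)).getD 0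
    else (PySem.List.max? s3.2 (fun x => x)).getD 0 - 1

-- ===== PORT B =====

-- the (identical) adjacency-list construction loop of B's solution
def buildAdjB (n : Int) (edges : List (Int × Int)) : List (List Int) :=
  edges.foldl
    (fun adj p =>
      let a1 := PySem.List.pySetD adj p.1 (PySem.List.pyGetD adj p.1 [] ++ [p.2])
      PySem.List.pySetD a1 p.2 (PySem.List.pyGetD a1 p.2 [] ++ [p.1]))
    (List.replicate (n + 1).toNat ([] : List Int))

-- the `while stack:` loop of B's run; fueled only to make it total in Lean (the caller's
-- fuel exceeds the number of iterations the loop can make).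
def runMachine (fuel : Nat) (stack : List (Int × List Int)) (vst : List Bool) (d : List Int)
    (adj : List (List Int)) : List Bool × List Int :=
  match fuel with
  | 0 => (vst, d)
  | fuel + 1 =>
    match stack with
    | [] => (vst, d)
    | (v, ns) :: rest =>
      match ns with
      | [] => runMachine fuel rest vst d adj
      | nxt :: ns' =>
        if PySem.List.pyGetD vst nxt true = false then
          runMachine fuel ((nxt, PySem.List.pyGetD adj nxt []) :: (v, ns') :: rest)
            (PySem.List.pySetD vst nxt true)
            (PySem.List.pySetD d nxt (PySem.List.pyGetD d v 0 + 1)) adj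
        else runMachine fuel ((v, ns') :: rest) vst d adj

-- run(src)
def runB (n : Int) (adj : List (List Int)) (src : Int) : List Int :=
  let vst := PySem.List.pySetD (List.replicate (n + 1).toNat false) src true
  let d := List.replicate (n + 1).toNat (0 : Int)
  let S := (adj.map List.length).sum
  (runMachine ((n + 1).toNat * (S + 2) + S + 2) [(src, PySem.List.pyGetD adj src [])] vst d adj).2

def solution_alt (n : Int) (edges : List (Int × Int)) : Int :=
  let adj := buildAdjB n edges
  let d1 := runB n adj 1
  let d2 := runB n adj (((PySem.List.index? d1 ((PySem.List.max? d1 (fun x => x)).getD 0)).getD 0 : Nat) : Int)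
  let m2 := (PySem.List.max? d2 (fun x => x)).getD 0
  if 1 < PySem.List.count d2 m2 then m2
  else
    let d3 := runB n adj (((PySem.List.index? d2 m2).getD 0 : Nat) : Int)
    let m3 := (PySem.List.max? d3 (fun x => x)).getD 0
    if 1 < PySem.List.count d3 m3 then m3 else m3 - 1

-- ===== PRECONDITION & SPEC =====

-- Pre_ excludes exactly the inputs where Python A raises: n < 1 (vst[1]/adj_lst[1] is an
-- IndexError) and edges with an endpoint outside the index range of adj_lst (IndexError).
def Pre_solution (n : Int) (edges : List (Int × Int)) : Prop :=
  1 ≤ n ∧ ∀ p ∈ edges,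
    PySem.Raise.InRange (n + 1).toNat p.1 ∧ PySem.Raise.InRange (n + 1).toNat p.2
instance (n : Int) (edges : List (Int × Int)) : Decidable (Pre_solution n edges) := by
  unfold Pre_solution; infer_instance

def pvWitness_solution : Int × (List (Int × Int)) := (4, [(1, 2), (2, 3), (3, 4)])

def Spec_solution (n : Int) (edges : List (Int × Int)) (out : Int) : Prop := out = solution_alt n edges
instance (n : Int) (edges : List (Int × Int)) (out : Int) : Decidable (Spec_solution n edges out) := by unfold Spec_solution; infer_instance

-- ===== CLAIM (what is proved, stated in full; the proofs are below) =====
def Claim_equal_solution : Prop := ∀ (n : Int) (edges : List (Int × Int)), Dom_solution n edges → Pre_solution n edges → Spec_solution n edges (solution n edges)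

-- ===== LEMMAS AND PROOFS =====

-- measure helpers for the stack machine
def cfV (vst : List Bool) : Nat := vst.count false
def sLens (stack : List (Int × List Int)) : Nat := (stack.map (fun f => f.2.length)).sum
def totA (adj : List (List Int)) : Nat := (adj.map List.length).sum
def muM (adj : List (List Int)) (stack : List (Int × List Int)) (vst : List Bool) : Nat :=
  cfV vst * (totA adj + 2) + sLens stack + stack.length

theorem count_false_set_succ (l : List Bool) (k : Nat) (hf : l[k]? = some false) :
    (l.set k true).count false + 1 = l.count false := by
  induction l generalizing k with
  | nil => simp at hf
  | cons x t ih =>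
    cases k with
    | zero => simp_all
    | succ k =>
      have := ih k (by simpa using hf)
      cases x <;> simp <;> omega

theorem count_false_set_le (l : List Bool) (k : Nat) :
    (l.set k true).count false ≤ l.count false := by
  induction l generalizing k with
  | nil => simp
  | cons x t ih =>
    cases k with
    | zero => cases x <;> simp
    | succ k => cases x <;> simpa using ih k

theorem cf_pySetD_succ {vst : List Bool} {i : Int}
    (h : PySem.List.pyGetD vst i true = false) :
    cfV (PySem.List.pySetD vst i true) + 1 = cfV vst := by
  unfold PySem.List.pyGetD PySem.List.pyGet? PySem.List.pySetD PySem.List.pySet? at *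
  cases hk : PySem.List.pyIdx? vst.length i with
  | none => rw [hk] at h; simp at h
  | some k =>
    rw [hk] at h
    simp only [Option.map_some, Option.getD_some, Option.bind_some] at h ⊢
    cases hg : vst[k]? with
    | none => rw [hg] at h; simp at h
    | some b =>
      rw [hg] at h; simp at h; subst h
      simpa [cfV] using count_false_set_succ vst k hg

theorem cf_pySetD_le (vst : List Bool) (i : Int) :
    cfV (PySem.List.pySetD vst i true) ≤ cfV vst := by
  unfold PySem.List.pySetD PySem.List.pySet?
  cases hk : PySem.List.pyIdx? vst.length i with
  | none => simp
  | some k => simpa [cfV] using count_false_set_le vst k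

theorem len_pyGetD_le (adj : List (List Int)) (x : Int) :
    (PySem.List.pyGetD adj x []).length ≤ totA adj := by
  unfold PySem.List.pyGetD
  cases hg : PySem.List.pyGet? adj x with
  | none => simp
  | some l =>
    have hm : l ∈ adj := PySem.List.mem_of_pyGet?_eq_some _ hg
    simp only [Option.getD_some]
    exact List.single_le_sum (by simp) _ (List.mem_map_of_mem hm)

-- the three transitions of the machine decrease the measure
theorem mu_pop (adj : List (List Int)) (v : Int) (rest : List (Int × List Int)) (vst : List Bool) :
    muM adj rest vst < muM adj ((v, []) :: rest) vst := by
  simp [muM, sLens]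

theorem mu_skip (adj : List (List Int)) (v nxt : Int) (ns' : List Int)
    (rest : List (Int × List Int)) (vst : List Bool) :
    muM adj ((v, ns') :: rest) vst < muM adj ((v, nxt :: ns') :: rest) vst := by
  simp [muM, sLens]

theorem mu_visit (adj : List (List Int)) (v nxt : Int) (ns' : List Int)
    (rest : List (Int × List Int)) (vst : List Bool)
    (h : PySem.List.pyGetD vst nxt true = false) :
    muM adj ((nxt, PySem.List.pyGetD adj nxt []) :: (v, ns') :: rest)
        (PySem.List.pySetD vst nxt true)
      < muM adj ((v, nxt :: ns') :: rest) vst := by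
  have h1 := cf_pySetD_succ h
  have h2 := len_pyGetD_le adj nxt
  simp only [muM, sLens, List.map_cons, List.sum_cons, List.length_cons]
  set c := cfV (PySem.List.pySetD vst nxt true) with hc
  have : cfV vst = c + 1 := by omega
  rw [this]
  have : (c + 1) * (totA adj + 2) = c * (totA adj + 2) + (totA adj + 2) := by ring
  omega

-- fuel-free reference semantics for the machine (proof device)
def execM (adj : List (List Int)) (stack : List (Int × List Int)) (vst : List Bool)
    (d : List Int) : List Bool × List Int :=
  match stack with
  | [] => (vst, d)
  | (v, ns) :: rest =>
    match ns with
    | [] => execM adj rest vst d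
    | nxt :: ns' =>
      if PySem.List.pyGetD vst nxt true = false then
        execM adj ((nxt, PySem.List.pyGetD adj nxt []) :: (v, ns') :: rest)
          (PySem.List.pySetD vst nxt true)
          (PySem.List.pySetD d nxt (PySem.List.pyGetD d v 0 + 1))
      else execM adj ((v, ns') :: rest) vst d
termination_by muM adj stack vst
decreasing_by
  · exact mu_pop adj v rest vst
  · exact mu_visit adj v nxt ns' rest vst (by assumption)
  · exact mu_skip adj v nxt ns' rest vst

theorem runMachine_eq_execM :
    ∀ (g : Nat) (stack : List (Int × List Int)) (vst : List Bool) (d : List Int)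
      (adj : List (List Int)), muM adj stack vst < g →
      runMachine g stack vst d adj = execM adj stack vst d := by
  intro g
  induction g with
  | zero => intro stack vst d adj h; omega
  | succ g ih =>
    intro stack vst d adj h
    match stack with
    | [] => rw [runMachine, execM]
    | (v, ns) :: rest =>
      match ns with
      | [] =>
        rw [runMachine, execM]
        exact ih rest vst d adj (lt_of_lt_of_le (mu_pop adj v rest vst) (by omega))
      | nxt :: ns' =>
        rw [runMachine, execM]
        by_cases hv : PySem.List.pyGetD vst nxt true = false
        · rw [if_pos hv, if_pos hv]
          exact ih _ _ _ adj (lt_of_lt_of_le (mu_visit adj v nxt ns' rest vst hv) (by omega))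
        · rw [if_neg hv, if_neg hv]
          exact ih _ _ _ adj (lt_of_lt_of_le (mu_skip adj v nxt ns' rest vst) (by omega))

-- metatheory of A's fueled dfs: it never unmarks a node and preserves lengths
theorem dfs_meta : ∀ (fuel : Nat),
    (∀ (v : Int) (vst : List Bool) (d : List Int) (adj : List (List Int)),
      cfV (dfsA fuel v vst d adj).1 ≤ cfV vst ∧
      (dfsA fuel v vst d adj).1.length = vst.length ∧
      (dfsA fuel v vst d adj).2.length = d.length) ∧
    (∀ (v : Int) (ns : List Int) (vst : List Bool) (d : List Int) (adj : List (List Int)),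
      cfV (dfsLoopA fuel v ns vst d adj).1 ≤ cfV vst ∧
      (dfsLoopA fuel v ns vst d adj).1.length = vst.length ∧
      (dfsLoopA fuel v ns vst d adj).2.length = d.length) := by
  have key : ∀ (fuel : Nat),
      (∀ (v : Int) (vst : List Bool) (d : List Int) (adj : List (List Int)),
        cfV (dfsA fuel v vst d adj).1 ≤ cfV vst ∧
        (dfsA fuel v vst d adj).1.length = vst.length ∧
        (dfsA fuel v vst d adj).2.length = d.length) →
      (∀ (v : Int) (ns : List Int) (vst : List Bool) (d : List Int) (adj : List (List Int)),
        cfV (dfsLoopA fuel v ns vst d adj).1 ≤ cfV vst ∧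
        (dfsLoopA fuel v ns vst d adj).1.length = vst.length ∧
        (dfsLoopA fuel v ns vst d adj).2.length = d.length) := by
    intro fuel hdfs v ns
    induction ns with
    | nil => intro vst d adj; rw [dfsLoopA]; exact ⟨le_refl _, rfl, rfl⟩
    | cons nxt rest ih =>
      intro vst d adj
      rw [dfsLoopA]
      by_cases hv : PySem.List.pyGetD vst nxt true = false
      · simp only [if_pos hv]
        obtain ⟨h1, h2, h3⟩ :=
          hdfs nxt vst (PySem.List.pySetD d nxt (PySem.List.pyGetD d v 0 + 1)) adj
        obtain ⟨g1, g2, g3⟩ :=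
          ih (dfsA fuel nxt vst (PySem.List.pySetD d nxt (PySem.List.pyGetD d v 0 + 1)) adj).1
            (dfsA fuel nxt vst (PySem.List.pySetD d nxt (PySem.List.pyGetD d v 0 + 1)) adj).2 adj
        exact ⟨le_trans g1 h1, by rw [g2, h2],
          by rw [g3, h3, PySem.List.length_pySetD]⟩
      · simp only [if_neg hv]; exact ih vst d adj
  intro fuel
  induction fuel with
  | zero =>
    have hdfs : ∀ (v : Int) (vst : List Bool) (d : List Int) (adj : List (List Int)),
        cfV (dfsA 0 v vst d adj).1 ≤ cfV vst ∧
        (dfsA 0 v vst d adj).1.length = vst.length ∧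
        (dfsA 0 v vst d adj).2.length = d.length := by
      intro v vst d adj; rw [dfsA]; exact ⟨le_refl _, rfl, rfl⟩
    exact ⟨hdfs, key 0 hdfs⟩
  | succ f ih =>
    have hdfs : ∀ (v : Int) (vst : List Bool) (d : List Int) (adj : List (List Int)),
        cfV (dfsA (f + 1) v vst d adj).1 ≤ cfV vst ∧
        (dfsA (f + 1) v vst d adj).1.length = vst.length ∧
        (dfsA (f + 1) v vst d adj).2.length = d.length := by
      intro v vst d adj
      rw [dfsA]
      obtain ⟨h1, h2, h3⟩ :=
        key f ih.1 v (PySem.List.pyGetD adj v []) (PySem.List.pySetD vst v true) d adj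
      exact ⟨le_trans h1 (cf_pySetD_le vst v), by rw [h2, PySem.List.length_pySetD], h3⟩
    exact ⟨hdfs, key (f + 1) hdfs⟩

-- the explicit-stack machine absorbs one frame exactly as A's dfs loop processes it
theorem sim : ∀ (N fuel : Nat) (v : Int) (ns : List Int) (stack : List (Int × List Int))
    (vst : List Bool) (d : List Int) (adj : List (List Int)),
    muM adj ((v, ns) :: stack) vst < N → cfV vst < fuel →
    execM adj ((v, ns) :: stack) vst d =
      execM adj stack (dfsLoopA fuel v ns vst d adj).1 (dfsLoopA fuel v ns vst d adj).2 := by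
  intro N
  induction N with
  | zero => intro fuel v ns stack vst d adj hN; omega
  | succ N ih =>
    intro fuel v ns stack vst d adj hN hf
    match ns with
    | [] => rw [execM, dfsLoopA]
    | nxt :: ns' =>
      rw [execM]
      by_cases hv : PySem.List.pyGetD vst nxt true = false
      · rw [if_pos hv]
        have hcf := cf_pySetD_succ hv
        obtain ⟨f, rfl⟩ : ∃ f, fuel = f + 1 := ⟨fuel - 1, by omega⟩
        have hmu1 :
            muM adj ((nxt, PySem.List.pyGetD adj nxt []) :: (v, ns') :: stack)
              (PySem.List.pySetD vst nxt true) < N := by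
          have := mu_visit adj v nxt ns' stack vst hv
          omega
        have h1 := ih f nxt (PySem.List.pyGetD adj nxt []) ((v, ns') :: stack)
          (PySem.List.pySetD vst nxt true)
          (PySem.List.pySetD d nxt (PySem.List.pyGetD d v 0 + 1)) adj hmu1 (by omega)
        have hdfsA : dfsA (f + 1) nxt vst
              (PySem.List.pySetD d nxt (PySem.List.pyGetD d v 0 + 1)) adj
            = dfsLoopA f nxt (PySem.List.pyGetD adj nxt []) (PySem.List.pySetD vst nxt true)
              (PySem.List.pySetD d nxt (PySem.List.pyGetD d v 0 + 1)) adj := by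
          rw [dfsA]
        have hcfs : cfV (dfsA (f + 1) nxt vst
              (PySem.List.pySetD d nxt (PySem.List.pyGetD d v 0 + 1)) adj).1 + 1 ≤ cfV vst := by
          rw [hdfsA]
          have := ((dfs_meta f).2 nxt (PySem.List.pyGetD adj nxt [])
            (PySem.List.pySetD vst nxt true)
            (PySem.List.pySetD d nxt (PySem.List.pyGetD d v 0 + 1)) adj).1
          omega
        have hmu2 : muM adj ((v, ns') :: stack)
            (dfsA (f + 1) nxt vst
              (PySem.List.pySetD d nxt (PySem.List.pyGetD d v 0 + 1)) adj).1 < N := by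
          have hexp : (cfV (dfsA (f + 1) nxt vst
                (PySem.List.pySetD d nxt (PySem.List.pyGetD d v 0 + 1)) adj).1 + 1)
                * (totA adj + 2)
              ≤ cfV vst * (totA adj + 2) := Nat.mul_le_mul_right _ hcfs
          rw [Nat.succ_mul] at hexp
          simp only [muM, sLens, List.map_cons, List.sum_cons, List.length_cons] at hN ⊢
          omega
        have h2 := ih (f + 1) v ns' stack
          (dfsA (f + 1) nxt vst (PySem.List.pySetD d nxt (PySem.List.pyGetD d v 0 + 1)) adj).1
          (dfsA (f + 1) nxt vst (PySem.List.pySetD d nxt (PySem.List.pyGetD d v 0 + 1)) adj).2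
          adj hmu2 (by omega)
        rw [← hdfsA] at h1
        conv_rhs => rw [dfsLoopA]
        simp only [if_pos hv]
        rw [h1, h2]
      · rw [if_neg hv]
        have h := ih fuel v ns' stack vst d adj
          (by have := mu_skip adj v nxt ns' stack vst; omega) hf
        conv_rhs => rw [dfsLoopA]
        simp only [if_neg hv]
        exact h

-- one full pass: B's run(src) returns exactly the distance array of A's dfs pass
theorem pass_eq (n : Int) (adj : List (List Int)) (src : Int) (hn : 1 ≤ n)
    (h : PySem.Raise.InRange (n + 1).toNat src) :
    runB n adj src =
      (dfsA ((List.replicate (n + 1).toNat false).length + 1) src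
        (List.replicate (n + 1).toNat false) (List.replicate (n + 1).toNat (0 : Int)) adj).2 := by
  have hL2 : 2 ≤ (n + 1).toNat := by omega
  have hget : PySem.List.pyGetD (List.replicate (n + 1).toNat false) src true = false := by
    obtain ⟨hlo, hhi⟩ := h
    unfold PySem.List.pyGetD PySem.List.pyGet? PySem.List.pyIdx?
    simp only [List.length_replicate]
    by_cases hpos : 0 ≤ src
    · rw [if_pos hpos, if_pos (by exact_mod_cast hhi)]
      have hk : src.toNat < (n + 1).toNat := by omega
      have hrep : (List.replicate (n + 1).toNat false)[src.toNat]? = some false := by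
        rw [List.getElem?_replicate, if_pos hk]
      simp [hrep]
    · rw [if_neg hpos, if_pos (by exact_mod_cast hlo)]
      have hk : (n + 1).toNat - (-src).toNat < (n + 1).toNat := by omega
      have hrep : (List.replicate (n + 1).toNat false)[(n + 1).toNat - (-src).toNat]?
          = some false := by
        rw [List.getElem?_replicate, if_pos hk]
      simp [hrep]
  have hcf1 := cf_pySetD_succ hget
  have hcfrep : cfV (List.replicate (n + 1).toNat false) = (n + 1).toNat := by
    simp [cfV]
  simp only [runB, List.length_replicate]
  have hmu : muM adj [(src, PySem.List.pyGetD adj src [])]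
      (PySem.List.pySetD (List.replicate (n + 1).toNat false) src true)
      < (n + 1).toNat * ((adj.map List.length).sum + 2) + (adj.map List.length).sum + 2 := by
    have hlen := len_pyGetD_le adj src
    simp only [totA] at hlen
    simp only [muM, sLens, List.map_cons, List.sum_cons, List.map_nil, List.sum_nil,
      List.length_cons, List.length_nil, totA]
    set c := cfV (PySem.List.pySetD (List.replicate (n + 1).toNat false) src true) with hc
    have hstep : c + 1 = (n + 1).toNat := by rw [hc, hcf1, hcfrep]
    have hmul : (c + 1) * ((adj.map List.length).sum + 2)
        = c * ((adj.map List.length).sum + 2) + ((adj.map List.length).sum + 2) := by ring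
    rw [← hstep]
    omega
  rw [runMachine_eq_execM _ _ _ _ _ hmu]
  rw [sim (muM adj [(src, PySem.List.pyGetD adj src [])]
        (PySem.List.pySetD (List.replicate (n + 1).toNat false) src true) + 1)
      ((n + 1).toNat) src (PySem.List.pyGetD adj src []) []
      (PySem.List.pySetD (List.replicate (n + 1).toNat false) src true)
      (List.replicate (n + 1).toNat (0 : Int)) adj (by omega) (by omega)]
  rw [execM, dfsA]

-- A ⇒ B assembled pass by pass
theorem solution_eq_alt (n : Int) (edges : List (Int × Int)) (hpre : Pre_solution n edges) :
    solution n edges = solution_alt n edges := by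
  obtain ⟨hn, -⟩ := hpre
  have hL2 : 2 ≤ (n + 1).toNat := by omega
  have hin1 : PySem.Raise.InRange (n + 1).toNat 1 := ⟨by omega, by omega⟩
  have e1 := pass_eq n (buildAdjA n edges) 1 hn hin1
  have hlen1 : (dfsA ((List.replicate (n + 1).toNat false).length + 1) 1
      (List.replicate (n + 1).toNat false) (List.replicate (n + 1).toNat (0 : Int))
      (buildAdjA n edges)).2.length = (n + 1).toNat := by
    rw [((dfs_meta ((List.replicate (n + 1).toNat false).length + 1)).1 1
      (List.replicate (n + 1).toNat false) (List.replicate (n + 1).toNat (0 : Int))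
      (buildAdjA n edges)).2.2, List.length_replicate]
  have hin2 : PySem.Raise.InRange (n + 1).toNat
      (((PySem.List.index? (dfsA ((List.replicate (n + 1).toNat false).length + 1) 1
          (List.replicate (n + 1).toNat false) (List.replicate (n + 1).toNat (0 : Int))
          (buildAdjA n edges)).2
        ((PySem.List.max? (dfsA ((List.replicate (n + 1).toNat false).length + 1) 1
          (List.replicate (n + 1).toNat false) (List.replicate (n + 1).toNat (0 : Int))
          (buildAdjA n edges)).2 (fun x => x)).getD 0)).getD 0 : Nat) : Int) := by
    cases hidx : PySem.List.index? (dfsA ((List.replicate (n + 1).toNat false).length + 1) 1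
        (List.replicate (n + 1).toNat false) (List.replicate (n + 1).toNat (0 : Int))
        (buildAdjA n edges)).2
        ((PySem.List.max? (dfsA ((List.replicate (n + 1).toNat false).length + 1) 1
          (List.replicate (n + 1).toNat false) (List.replicate (n + 1).toNat (0 : Int))
          (buildAdjA n edges)).2 (fun x => x)).getD 0) with
    | none => exact ⟨by omega, by simp; omega⟩
    | some k =>
      obtain ⟨hk, -, -⟩ := PySem.List.getElem_of_index?_eq_some hidx
      rw [hlen1] at hk
      exact ⟨by omega, by simp; omega⟩
  have e2 := pass_eq n (buildAdjA n edges) _ hn hin2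
  simp only [solution, solution_alt, resetArr]
  rw [show buildAdjB n edges = buildAdjA n edges from rfl]
  rw [e1, e2]
  by_cases hbr : 1 < PySem.List.count (dfsA ((List.replicate (n + 1).toNat false).length + 1)
      (((PySem.List.index? (dfsA ((List.replicate (n + 1).toNat false).length + 1) 1
          (List.replicate (n + 1).toNat false) (List.replicate (n + 1).toNat (0 : Int))
          (buildAdjA n edges)).2
        ((PySem.List.max? (dfsA ((List.replicate (n + 1).toNat false).length + 1) 1
          (List.replicate (n + 1).toNat false) (List.replicate (n + 1).toNat (0 : Int))
          (buildAdjA n edges)).2 (fun x => x)).getD 0)).getD 0 : Nat) : Int)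
      (List.replicate (n + 1).toNat false) (List.replicate (n + 1).toNat (0 : Int))
      (buildAdjA n edges)).2
      ((PySem.List.max? (dfsA ((List.replicate (n + 1).toNat false).length + 1)
      (((PySem.List.index? (dfsA ((List.replicate (n + 1).toNat false).length + 1) 1
          (List.replicate (n + 1).toNat false) (List.replicate (n + 1).toNat (0 : Int))
          (buildAdjA n edges)).2
        ((PySem.List.max? (dfsA ((List.replicate (n + 1).toNat false).length + 1) 1
          (List.replicate (n + 1).toNat false) (List.replicate (n + 1).toNat (0 : Int))
          (buildAdjA n edges)).2 (fun x => x)).getD 0)).getD 0 : Nat) : Int)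
      (List.replicate (n + 1).toNat false) (List.replicate (n + 1).toNat (0 : Int))
      (buildAdjA n edges)).2 (fun x => x)).getD 0)
  · rw [if_pos hbr, if_pos hbr]
  · rw [if_neg hbr, if_neg hbr]
    have hlen2 : (dfsA ((List.replicate (n + 1).toNat false).length + 1)
        (((PySem.List.index? (dfsA ((List.replicate (n + 1).toNat false).length + 1) 1
            (List.replicate (n + 1).toNat false) (List.replicate (n + 1).toNat (0 : Int))
            (buildAdjA n edges)).2
          ((PySem.List.max? (dfsA ((List.replicate (n + 1).toNat false).length + 1) 1
            (List.replicate (n + 1).toNat false) (List.replicate (n + 1).toNat (0 : Int))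
            (buildAdjA n edges)).2 (fun x => x)).getD 0)).getD 0 : Nat) : Int)
        (List.replicate (n + 1).toNat false) (List.replicate (n + 1).toNat (0 : Int))
        (buildAdjA n edges)).2.length = (n + 1).toNat := by
      rw [((dfs_meta ((List.replicate (n + 1).toNat false).length + 1)).1 _
        (List.replicate (n + 1).toNat false) (List.replicate (n + 1).toNat (0 : Int))
        (buildAdjA n edges)).2.2, List.length_replicate]
    have hin3 : PySem.Raise.InRange (n + 1).toNat
        (((PySem.List.index? (dfsA ((List.replicate (n + 1).toNat false).length + 1)
            (((PySem.List.index? (dfsA ((List.replicate (n + 1).toNat false).length + 1) 1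
                (List.replicate (n + 1).toNat false) (List.replicate (n + 1).toNat (0 : Int))
                (buildAdjA n edges)).2
              ((PySem.List.max? (dfsA ((List.replicate (n + 1).toNat false).length + 1) 1
                (List.replicate (n + 1).toNat false) (List.replicate (n + 1).toNat (0 : Int))
                (buildAdjA n edges)).2 (fun x => x)).getD 0)).getD 0 : Nat) : Int)
            (List.replicate (n + 1).toNat false) (List.replicate (n + 1).toNat (0 : Int))
            (buildAdjA n edges)).2
          ((PySem.List.max? (dfsA ((List.replicate (n + 1).toNat false).length + 1)
            (((PySem.List.index? (dfsA ((List.replicate (n + 1).toNat false).length + 1) 1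
                (List.replicate (n + 1).toNat false) (List.replicate (n + 1).toNat (0 : Int))
                (buildAdjA n edges)).2
              ((PySem.List.max? (dfsA ((List.replicate (n + 1).toNat false).length + 1) 1
                (List.replicate (n + 1).toNat false) (List.replicate (n + 1).toNat (0 : Int))
                (buildAdjA n edges)).2 (fun x => x)).getD 0)).getD 0 : Nat) : Int)
            (List.replicate (n + 1).toNat false) (List.replicate (n + 1).toNat (0 : Int))
            (buildAdjA n edges)).2 (fun x => x)).getD 0)).getD 0 : Nat) : Int) := by
      cases hidx : PySem.List.index? (dfsA ((List.replicate (n + 1).toNat false).length + 1)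
          (((PySem.List.index? (dfsA ((List.replicate (n + 1).toNat false).length + 1) 1
              (List.replicate (n + 1).toNat false) (List.replicate (n + 1).toNat (0 : Int))
              (buildAdjA n edges)).2
            ((PySem.List.max? (dfsA ((List.replicate (n + 1).toNat false).length + 1) 1
              (List.replicate (n + 1).toNat false) (List.replicate (n + 1).toNat (0 : Int))
              (buildAdjA n edges)).2 (fun x => x)).getD 0)).getD 0 : Nat) : Int)
          (List.replicate (n + 1).toNat false) (List.replicate (n + 1).toNat (0 : Int))
          (buildAdjA n edges)).2
          ((PySem.List.max? (dfsA ((List.replicate (n + 1).toNat false).length + 1)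
            (((PySem.List.index? (dfsA ((List.replicate (n + 1).toNat false).length + 1) 1
                (List.replicate (n + 1).toNat false) (List.replicate (n + 1).toNat (0 : Int))
                (buildAdjA n edges)).2
              ((PySem.List.max? (dfsA ((List.replicate (n + 1).toNat false).length + 1) 1
                (List.replicate (n + 1).toNat false) (List.replicate (n + 1).toNat (0 : Int))
                (buildAdjA n edges)).2 (fun x => x)).getD 0)).getD 0 : Nat) : Int)
            (List.replicate (n + 1).toNat false) (List.replicate (n + 1).toNat (0 : Int))
            (buildAdjA n edges)).2 (fun x => x)).getD 0) with
      | none => exact ⟨by omega, by simp; omega⟩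
      | some k =>
        obtain ⟨hk, -, -⟩ := PySem.List.getElem_of_index?_eq_some hidx
        rw [hlen2] at hk
        exact ⟨by omega, by simp; omega⟩
    have e3 := pass_eq n (buildAdjA n edges) _ hn hin3
    rw [e3]

-- ===== VERDICT (by name: the statement is the Claim_ definition above) =====
theorem solution_spec : Claim_equal_solution := by
  intro n edges _ hpre
  exact solution_eq_alt n edges hpre
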